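-- pv_equiv track=rewrite | github.com/RH2/HexTileGen | hextile_utils.py | shift_and_find_zero_groups
-- ===== SOURCE A (Python) =====
-- def shift_and_find_zero_groups(occupancy):
--     occupancy.pop(0)
--     try:
--         first_one_index = occupancy.index(1)
--     except:
--         return []  # Return empty list when no zeros
--
--     shifted_occupancy = occupancy[first_one_index:] + occupancy[:first_one_index]
--     zero_groups = []
--     current_group = []
--
--     for i, val in enumerate(shifted_occupancy):
--         if val == 0:
--             current_group.append((i+first_one_index)%len(occupancy))
--         else:
--             if current_group:
--                 zero_groups.append(current_group)
--                 current_group = []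
--
--     if current_group:
--         zero_groups.append(current_group)
--
--     return zero_groups
-- ===== SOURCE B (Python) =====
-- def shift_and_find_zero_groups(occupancy):
--     occupancy.pop(0)
--     try:
--         first = occupancy.index(1)
--     except ValueError:
--         return []
--     n = len(occupancy)
--     # separator positions: indices holding any nonzero value, rotated so the
--     # first 1 leads; zero groups are the arithmetic ranges between consecutive
--     # separators (wrapping once past the end), no per-element run accumulator.
--     seps = [i for i, v in enumerate(occupancy) if v != 0]
--     k = seps.index(first)
--     seps = seps[k:] + seps[:k]
--     groups = []
--     for a, b in zip(seps, seps[1:] + seps[:1]):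
--         if b > a:
--             gap = list(range(a + 1, b))
--         else:
--             gap = list(range(a + 1, n)) + list(range(0, b))
--         if gap:
--             groups.append(gap)
--     return groups
-- ===== Notes on version B (the rewrite author's own statement) =====
-- stated objective: alternative
-- what changed: B replaces A's rotate-and-scan state machine (rotated copy, per-element current_group accumulator, modular index mapping) with a separator-gap algorithm: it collects the positions of all nonzero values, rotates that position list to start at the first 1, and emits each zero group directly as an arithmetic range between consecutive separator positions (wrapping once past the end).
import Mathlib
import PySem

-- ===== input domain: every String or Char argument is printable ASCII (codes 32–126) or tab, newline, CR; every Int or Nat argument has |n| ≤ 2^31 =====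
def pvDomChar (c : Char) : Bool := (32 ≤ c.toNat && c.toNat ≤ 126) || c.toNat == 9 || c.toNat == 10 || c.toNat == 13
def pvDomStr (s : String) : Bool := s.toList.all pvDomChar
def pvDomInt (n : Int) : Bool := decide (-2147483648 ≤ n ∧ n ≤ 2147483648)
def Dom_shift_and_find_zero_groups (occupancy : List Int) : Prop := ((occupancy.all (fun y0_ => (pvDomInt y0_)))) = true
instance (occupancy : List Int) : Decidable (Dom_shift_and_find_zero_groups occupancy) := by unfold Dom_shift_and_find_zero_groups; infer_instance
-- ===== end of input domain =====

-- B replaces A's rotate-and-scan run accumulator with a separator-gap algorithm: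
-- collect the nonzero positions, rotate them to start at the first 1, and emit each
-- zero group as an arithmetic range between consecutive separators (alternative, same O(n)).
-- Both programs pop occupancy's head in place; the equivalence proved here is about the
-- RETURN value (B performs the same pop(0) mutation as A).

-- ===== PORT A =====
-- the for-loop body of A, state = (zero_groups, current_group), one (i, val) pair per step
def pvStepA (first n : Int) (st : List (List Int) × List Int) (p : Int × Int) :
    List (List Int) × List Int :=
  if p.2 == 0 then (st.1, st.2 ++ [PySem.Int.mod (p.1 + first) n])
  else if st.2 ≠ [] then (st.1 ++ [st.2], []) else (st.1, [])

def shift_and_find_zero_groups (occupancy : List Int) : List (List Int) :=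
  match PySem.List.pop? occupancy 0 with
  | none => []                               -- occupancy.pop(0) raises IndexError: outside Pre_
  | some (_, occ) =>
    match PySem.List.index? occ 1 with
    | none => []                             -- bare except around occupancy.index(1)
    | some first =>
      let shifted := PySem.List.slice occ (some (first : Int)) none
                       ++ PySem.List.slice occ none (some (first : Int))
      let r := (PySem.List.enumerate shifted 0).foldl
                 (pvStepA (first : Int) (occ.length : Int)) ([], [])
      if r.2 ≠ [] then r.1 ++ [r.2] else r.1

-- ===== PORT B =====
-- the gap between consecutive separators a, b (the two-branch range expression of Source B)
def pvGap (n a b : Int) : List Int :=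
  if b > a then PySem.List.pyRange (a + 1) b 1
  else PySem.List.pyRange (a + 1) n 1 ++ PySem.List.pyRange 0 b 1

-- the for-loop body of B: append the gap between the pair's separators if nonempty
def pvGapStep (n : Int) (groups : List (List Int)) (ab : Int × Int) : List (List Int) :=
  let gap := pvGap n ab.1 ab.2
  if gap ≠ [] then groups ++ [gap] else groups

def shift_and_find_zero_groups_alt (occupancy : List Int) : List (List Int) :=
  match PySem.List.pop? occupancy 0 with
  | none => []                               -- occupancy.pop(0) raises IndexError: outside Pre_
  | some (_, occ) =>
    match PySem.List.index? occ 1 with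
    | none => []                             -- except ValueError
    | some first =>
      let n : Int := occ.length
      let seps := ((PySem.List.enumerate occ 0).filter (fun p => p.2 != 0)).map Prod.fst
      match PySem.List.index? seps (first : Int) with
      | none => []                           -- unreachable: occ[first] = 1, so first ∈ seps
      | some k =>
        let seps2 := PySem.List.slice seps (some (k : Int)) none
                       ++ PySem.List.slice seps none (some (k : Int))
        let pairs := seps2.zip (PySem.List.slice seps2 (some 1) none
                       ++ PySem.List.slice seps2 none (some 1))
        pairs.foldl (pvGapStep n) []

-- ===== PRECONDITION & SPEC =====
-- Pre_ excludes exactly the empty list, on which A's occupancy.pop(0) raises IndexError.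
def Pre_shift_and_find_zero_groups (occupancy : List Int) : Prop := occupancy ≠ []
instance (occupancy : List Int) : Decidable (Pre_shift_and_find_zero_groups occupancy) := by
  unfold Pre_shift_and_find_zero_groups; infer_instance
def pvWitness_shift_and_find_zero_groups : List Int := [1, 0, 1, 0, 0]

def Spec_shift_and_find_zero_groups (occupancy : List Int) (out : List (List Int)) : Prop :=
  out = shift_and_find_zero_groups_alt occupancy
instance (occupancy : List Int) (out : List (List Int)) :
    Decidable (Spec_shift_and_find_zero_groups occupancy out) := by
  unfold Spec_shift_and_find_zero_groups; infer_instance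

-- ===== CLAIM (what is proved, stated in full; the proofs are below) =====
def Claim_equal_shift_and_find_zero_groups : Prop :=
  ∀ (occupancy : List Int), Dom_shift_and_find_zero_groups occupancy →
    Pre_shift_and_find_zero_groups occupancy →
    Spec_shift_and_find_zero_groups occupancy (shift_and_find_zero_groups occupancy)

-- ===== LEMMAS AND PROOFS =====

-- the common loop body A's fold factors through, on (index, value) pairs
def pvStepQ (st : List (List Int) × List Int) (p : Int × Int) :
    List (List Int) × List Int :=
  if p.2 == 0 then (st.1, st.2 ++ [p.1])
  else if st.2 ≠ [] then (st.1 ++ [st.2], []) else (st.1, [])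

-- the same state machine on bare indices, zero-test z
def pvStep (z : Int → Bool) (st : List (List Int) × List Int) (i : Int) :
    List (List Int) × List Int :=
  if z i then (st.1, st.2 ++ [i]) else if st.2 ≠ [] then (st.1 ++ [st.2], []) else (st.1, [])

-- the runs of z-elements of a list, split at non-z elements, empties dropped
def pvChunks (z : Int → Bool) (cur : List Int) : List Int → List (List Int)
  | [] => if cur = [] then [] else [cur]
  | a :: l => if z a then pvChunks z (cur ++ [a]) l
              else (if cur = [] then [] else [cur]) ++ pvChunks z [] l

-- the circular-order index suffix strictly after position a (wrapping back to just before first)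
def pvSuff (first n a : Int) : List Int :=
  if first ≤ a then PySem.List.pyRange (a + 1) n 1 ++ PySem.List.pyRange 0 first 1
  else PySem.List.pyRange (a + 1) first 1

-- B's gap list, recursively over the remaining separators, closing back at s0
def pvGaps (n s0 : Int) (a : Int) : List Int → List (List Int)
  | [] => if pvGap n a s0 = [] then [] else [pvGap n a s0]
  | b :: ts => (if pvGap n a b = [] then [] else [pvGap n a b]) ++ pvGaps n s0 b ts

-- the (index, value) streams of A's loop and the circular index walk coincide
theorem pv_key (occ : List Int) (first : Nat) (hf : first < occ.length) :
    (PySem.List.enumerate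
        (PySem.List.slice occ (some (first : Int)) none
          ++ PySem.List.slice occ none (some (first : Int))) 0).map
      (fun p => (PySem.Int.mod (p.1 + (first : Int)) (occ.length : Int), p.2))
    = (PySem.List.pyRange (first : Int) (occ.length : Int) 1
        ++ PySem.List.pyRange 0 (first : Int) 1).map
        (fun i => (i, PySem.List.pyGetD occ i 0)) := by
  rw [PySem.List.slice_from_natCast, PySem.List.slice_to_natCast]
  apply List.ext_getElem
  · simp [PySem.List.length_enumerate, PySem.List.length_pyRange_one]
    omega
  · intro k hk1 hk2
    have hlen : (occ.drop first ++ occ.take first).length = occ.length := by simp; omega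
    have hk : k < occ.length := by
      simpa [PySem.List.length_enumerate, hlen] using hk1
    have hr1 : (PySem.List.pyRange (first : Int) (occ.length : Int) 1).length
        = occ.length - first := by
      rw [PySem.List.length_pyRange_one]; omega
    simp only [List.getElem_map, PySem.List.getElem_enumerate]
    by_cases hcase : k < occ.length - first
    · rw [List.getElem_append_left (by simp; omega),
          List.getElem_append_left (by rw [hr1]; omega)]
      rw [List.getElem_drop, PySem.List.getElem_pyRange_one]
      have hm : PySem.Int.mod ((0 : Int) + k + first) (occ.length : Int)
          = (first : Int) + k := by
        rw [PySem.Int.mod_eq_emod_of_pos (by omega)]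
        rw [Int.emod_eq_of_lt (by omega) (by omega)]
        omega
      rw [hm]
      have : PySem.List.pyGetD occ ((first : Int) + k) 0 = occ[first + k] := by
        have := PySem.List.pyGetD_natCast occ (first + k) 0
        push_cast at this
        rw [this, List.getD_eq_getElem occ 0 (by omega)]
      rw [this]
    · rw [List.getElem_append_right (by simp; omega),
          List.getElem_append_right (by rw [hr1]; omega)]
      simp only [List.length_drop, hr1]
      rw [List.getElem_take, PySem.List.getElem_pyRange_one]
      have hm : PySem.Int.mod ((0 : Int) + k + first) (occ.length : Int)
          = (0 : Int) + (k - (occ.length - first) : Nat) := by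
        rw [PySem.Int.mod_eq_emod_of_pos (by omega)]
        have : ((0 : Int) + k + first) = ((0 : Int) + (k - (occ.length - first) : Nat)) + occ.length := by
          omega
        rw [this, Int.add_emod_right]
        exact Int.emod_eq_of_lt (by omega) (by omega)
      rw [hm]
      have : PySem.List.pyGetD occ ((0:Int) + (k - (occ.length - first) : Nat)) 0
          = occ[k - (occ.length - first)] := by
        have := PySem.List.pyGetD_natCast occ (k - (occ.length - first) : Nat) 0
        rw [zero_add, this, List.getD_eq_getElem occ 0 (by omega)]
      rw [this]

-- pvGap closing back at first is exactly the circular suffix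
theorem pv_gap_close (first n a : Int) : pvGap n a first = pvSuff first n a := by
  unfold pvGap pvSuff
  split_ifs with h1 h2 h3 <;> first | rfl | omega

-- b is never a member of the gap it bounds
theorem pv_not_mem_gap (n a b : Int) : b ∉ pvGap n a b := by
  unfold pvGap
  split_ifs with h <;>
    simp only [List.mem_append, PySem.List.mem_pyRange_one] <;> omega

-- the state machine is the chunks function
theorem pv_fold_chunks (z : Int → Bool) :
    ∀ (l : List Int) (acc : List (List Int)) (cur : List Int),
      (if (l.foldl (pvStep z) (acc, cur)).2 ≠ [] then
         (l.foldl (pvStep z) (acc, cur)).1 ++ [(l.foldl (pvStep z) (acc, cur)).2]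
       else (l.foldl (pvStep z) (acc, cur)).1)
      = acc ++ pvChunks z cur l := by
  intro l
  induction l with
  | nil =>
    intro acc cur
    by_cases h : cur = [] <;> simp [pvChunks, h]
  | cons a l ih =>
    intro acc cur
    rw [List.foldl_cons]
    by_cases hz : z a = true
    · have hstep : pvStep z (acc, cur) a = (acc, cur ++ [a]) := by simp [pvStep, hz]
      rw [hstep, ih]
      simp only [pvChunks]
      rw [if_pos hz]
    · by_cases hc : cur = []
      · have hstep : pvStep z (acc, cur) a = (acc, []) := by simp [pvStep, hz, hc]
        rw [hstep, ih]
        simp only [pvChunks]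
        rw [if_neg hz, if_pos hc]
        simp
      · have hstep : pvStep z (acc, cur) a = (acc ++ [cur], []) := by simp [pvStep, hz, hc]
        rw [hstep, ih]
        simp only [pvChunks]
        rw [if_neg hz, if_neg hc]
        simp

-- chunks of an all-z list
theorem pv_chunks_allz (z : Int → Bool) :
    ∀ (l : List Int) (cur : List Int), (∀ x ∈ l, z x) →
      pvChunks z cur l = if cur ++ l = [] then [] else [cur ++ l] := by
  intro l
  induction l with
  | nil => intro cur _; simp [pvChunks]
  | cons a l ih =>
    intro cur h
    have ha : z a := h a (List.mem_cons_self ..)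
    simp only [pvChunks, ha, if_true]
    rw [ih _ (fun x hx => h x (List.mem_cons_of_mem _ hx))]
    simp

-- chunks over an all-z prefix
theorem pv_chunks_append (z : Int → Bool) :
    ∀ (l : List Int) (cur : List Int) (r : List Int), (∀ x ∈ l, z x) →
      pvChunks z cur (l ++ r) = pvChunks z (cur ++ l) r := by
  intro l
  induction l with
  | nil => intro cur r _; simp
  | cons a l ih =>
    intro cur r h
    have ha : z a := h a (List.mem_cons_self ..)
    simp only [List.cons_append, pvChunks, ha, if_true]
    rw [ih _ _ (fun x hx => h x (List.mem_cons_of_mem _ hx))]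
    simp

-- MAIN: chunks of the circular suffix after a = gaps between its separators
theorem pv_main (z : Int → Bool) (first n : Int) (h0 : 0 ≤ first) (h1 : first < n) :
    ∀ (k : Nat) (a : Int), 0 ≤ a → a < n → (pvSuff first n a).length ≤ k →
      pvChunks z [] (pvSuff first n a)
        = pvGaps n first a ((pvSuff first n a).filter (fun i => !(z i))) := by
  intro k
  induction k with
  | zero =>
    intro a _ _ hlen
    have hS : pvSuff first n a = [] := List.eq_nil_of_length_eq_zero (by omega)
    rw [hS]
    simp only [List.filter_nil, pvGaps, pvChunks]
    rw [pv_gap_close, hS]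
    simp
  | succ k ih =>
    intro a ha0 ha1 hlen
    cases hF : (pvSuff first n a).filter (fun i => !(z i)) with
    | nil =>
      have hall : ∀ x ∈ pvSuff first n a, z x := by
        intro x hx
        have := List.filter_eq_nil_iff.mp hF x hx
        simpa using this
      rw [pv_chunks_allz z _ [] hall]
      simp only [pvGaps, List.nil_append]
      rw [pv_gap_close]
    | cons b ts =>
      have hbmem : b ∈ (pvSuff first n a).filter (fun i => !(z i)) := by
        rw [hF]; exact List.mem_cons_self ..
      have hb := List.mem_filter.mp hbmem
      have hzb : z b = false := by simpa using hb.2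
      -- bounds on b from membership in the suffix
      have hbnd : (first ≤ a ∧ ((a + 1 ≤ b ∧ b < n) ∨ (0 ≤ b ∧ b < first)))
          ∨ (¬ first ≤ a ∧ a + 1 ≤ b ∧ b < first) := by
        by_cases hfa : first ≤ a
        · left
          refine ⟨hfa, ?_⟩
          have := hb.1
          unfold pvSuff at this
          rw [if_pos hfa] at this
          rcases List.mem_append.mp this with h | h <;>
            [left; right] <;> exact (PySem.List.mem_pyRange_one.mp h)
        · right
          refine ⟨hfa, ?_⟩
          have := hb.1
          unfold pvSuff at this
          rw [if_neg hfa] at this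
          exact PySem.List.mem_pyRange_one.mp this
      -- decomposition of the suffix at b
      have hdec : pvSuff first n a = pvGap n a b ++ b :: pvSuff first n b := by
        rcases hbnd with ⟨hfa, h | h⟩ | ⟨hfa, h⟩
        · -- first ≤ a < b < n
          unfold pvSuff pvGap
          rw [if_pos hfa, if_pos (by omega : first ≤ b), if_pos (by omega : b > a)]
          rw [PySem.List.pyRange_one_append (a + 1) b n (by omega) (by omega),
              PySem.List.pyRange_one_cons (by omega : b < n)]
          simp
        · -- b < first ≤ a  (wrap gap)
          unfold pvSuff pvGap
          rw [if_pos hfa, if_neg (by omega : ¬ first ≤ b), if_neg (by omega : ¬ b > a)]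
          rw [PySem.List.pyRange_one_append 0 b first (by omega) (by omega),
              PySem.List.pyRange_one_cons (by omega : b < first)]
          simp
        · -- a < b < first
          unfold pvSuff pvGap
          rw [if_neg hfa, if_neg (by omega : ¬ first ≤ b), if_pos (by omega : b > a)]
          rw [PySem.List.pyRange_one_append (a + 1) b first (by omega) (by omega),
              PySem.List.pyRange_one_cons (by omega : b < first)]
      have hbb : 0 ≤ b ∧ b < n := by rcases hbnd with ⟨_, h | h⟩ | ⟨_, h⟩ <;> constructor <;> omega
      -- the filter splits: nothing before b, and ts is the filter of the rest
      have hsplit : (pvGap n a b).filter (fun i => !(z i)) ++ b ::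
          (pvSuff first n b).filter (fun i => !(z i)) = b :: ts := by
        rw [← hF, hdec, List.filter_append, List.filter_cons]
        simp [hzb]
      have hgnil : (pvGap n a b).filter (fun i => !(z i)) = [] := by
        cases hg : (pvGap n a b).filter (fun i => !(z i)) with
        | nil => rfl
        | cons c cs =>
          exfalso
          rw [hg, List.cons_append] at hsplit
          have hcb : c = b := (List.cons_eq_cons.mp hsplit).1
          have : c ∈ pvGap n a b := List.mem_of_mem_filter (hg ▸ List.mem_cons_self ..)
          exact pv_not_mem_gap n a b (hcb ▸ this)
      have hts : ts = (pvSuff first n b).filter (fun i => !(z i)) := by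
        rw [hgnil, List.nil_append] at hsplit
        exact ((List.cons_eq_cons.mp hsplit).2).symm
      have hgall : ∀ x ∈ pvGap n a b, z x := by
        intro x hx
        have := List.filter_eq_nil_iff.mp hgnil x hx
        simpa using this
      have hlenb : (pvSuff first n b).length ≤ k := by
        have := congrArg List.length hdec
        simp at this
        omega
      rw [hdec, pv_chunks_append z _ _ _ hgall, List.nil_append]
      simp only [pvChunks, hzb, Bool.false_eq_true, if_false]
      rw [ih b hbb.1 hbb.2 hlenb, ← hts]
      simp only [pvGaps]

-- B's zip fold is the recursive gaps function
theorem pv_zipfold (n s0 : Int) :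
    ∀ (rest : List Int) (a : Int) (acc : List (List Int)),
      (((a :: rest).zip (rest ++ [s0])).foldl (pvGapStep n) acc)
        = acc ++ pvGaps n s0 a rest := by
  intro rest
  induction rest with
  | nil =>
    intro a acc
    simp only [List.nil_append, List.zip_cons_cons, List.zip_nil_left, List.foldl_cons,
      List.foldl_nil, pvGaps, pvGapStep]
    by_cases h : pvGap n a s0 = [] <;> simp [h]
  | cons b r ih =>
    intro a acc
    simp only [List.cons_append, List.zip_cons_cons, List.foldl_cons, pvGaps]
    rw [ih b]
    unfold pvGapStep
    by_cases h : pvGap n a b = [] <;> simp [h]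

-- ===== VERDICT (by name: the statement is the Claim_ definition above) =====
theorem shift_and_find_zero_groups_spec : Claim_equal_shift_and_find_zero_groups := by
  intro occupancy _ hpre
  unfold Spec_shift_and_find_zero_groups
  cases occupancy with
  | nil => exact absurd rfl hpre
  | cons a0 occ =>
    unfold shift_and_find_zero_groups shift_and_find_zero_groups_alt
    rw [PySem.List.pop?_zero_cons]
    cases hidx : PySem.List.index? occ 1 with
    | none => simp only [hidx]
    | some first =>
      obtain ⟨hf, hval, -⟩ := PySem.List.getElem_of_index?_eq_some hidx
      simp only [hidx]
      have hget : PySem.List.pyGetD occ (first : Int) 0 = 1 := by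
        rw [PySem.List.pyGetD_natCast, List.getD_eq_getElem occ 0 hf, hval]
      -- ===== A side: reduce to pvChunks over the circular index walk =====
      have hfold :
          (PySem.List.enumerate
              (PySem.List.slice occ (some (first : Int)) none
                ++ PySem.List.slice occ none (some (first : Int))) 0).foldl
            (pvStepA (first : Int) (occ.length : Int)) ([], [])
          = (PySem.List.pyRange (first : Int) (occ.length : Int) 1
              ++ PySem.List.pyRange 0 (first : Int) 1).foldl
              (pvStep (fun i => PySem.List.pyGetD occ i 0 == 0)) ([], []) := by
        have e1 : (PySem.List.enumerate
              (PySem.List.slice occ (some (first : Int)) none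
                ++ PySem.List.slice occ none (some (first : Int))) 0).foldl
            (pvStepA (first : Int) (occ.length : Int)) ([], [])
            = ((PySem.List.enumerate
              (PySem.List.slice occ (some (first : Int)) none
                ++ PySem.List.slice occ none (some (first : Int))) 0).map
              (fun p => (PySem.Int.mod (p.1 + (first : Int)) (occ.length : Int), p.2))).foldl
              pvStepQ ([], []) := by
          rw [List.foldl_map]; rfl
        rw [e1, pv_key occ first hf, List.foldl_map]
        rfl
      simp only [hfold]
      rw [pv_fold_chunks (fun i => PySem.List.pyGetD occ i 0 == 0)
            (PySem.List.pyRange (first : Int) (occ.length : Int) 1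
              ++ PySem.List.pyRange 0 (first : Int) 1) [] []]
      rw [List.nil_append]
      -- circular walk = first :: suffix after first
      have hcirc : PySem.List.pyRange (first : Int) (occ.length : Int) 1
            ++ PySem.List.pyRange 0 (first : Int) 1
          = (first : Int) :: pvSuff (first : Int) (occ.length : Int) (first : Int) := by
        rw [PySem.List.pyRange_one_cons (by exact_mod_cast hf)]
        unfold pvSuff
        rw [if_pos le_rfl]
        simp
      rw [hcirc]
      have hzfirst : ((PySem.List.pyGetD occ (first : Int) 0 == 0)) = false := by
        simp [hget]
      simp only [pvChunks, hzfirst, Bool.false_eq_true, if_false, if_true,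
        List.nil_append]
      rw [pv_main (fun i => PySem.List.pyGetD occ i 0 == 0) (first : Int) (occ.length : Int)
        (by exact_mod_cast Nat.zero_le first) (by exact_mod_cast hf)
        (pvSuff (first : Int) (occ.length : Int) (first : Int)).length (first : Int)
        (by exact_mod_cast Nat.zero_le first) (by exact_mod_cast hf) le_rfl]
      -- ===== B side =====
      have hsep : ((PySem.List.enumerate occ 0).filter (fun p => p.2 != 0)).map Prod.fst
          = (PySem.List.pyRange 0 (occ.length : Int) 1).filter
              (fun j => PySem.List.pyGetD occ j 0 != 0) := by
        rw [PySem.List.enumerate_eq_map_pyRange occ 0, List.filter_map, List.map_map]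
        simp [Function.comp_def]
      have hsplitR : (PySem.List.pyRange 0 (occ.length : Int) 1).filter
              (fun j => PySem.List.pyGetD occ j 0 != 0)
          = ((PySem.List.pyRange 0 (first : Int) 1).filter
              (fun j => PySem.List.pyGetD occ j 0 != 0))
            ++ (first : Int) :: ((PySem.List.pyRange ((first : Int) + 1) (occ.length : Int) 1).filter
              (fun j => PySem.List.pyGetD occ j 0 != 0)) := by
        rw [PySem.List.pyRange_one_append 0 (first : Int) (occ.length : Int)
              (by exact_mod_cast Nat.zero_le first) (by exact_mod_cast Nat.le_of_lt hf),
            List.filter_append,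
            PySem.List.pyRange_one_cons (a := (first : Int)) (b := (occ.length : Int))
              (by exact_mod_cast hf), List.filter_cons]
        simp [hget]
      have hIdx : PySem.List.index?
          (((PySem.List.pyRange 0 (first : Int) 1).filter
              (fun j => PySem.List.pyGetD occ j 0 != 0))
            ++ (first : Int) :: ((PySem.List.pyRange ((first : Int) + 1) (occ.length : Int) 1).filter
              (fun j => PySem.List.pyGetD occ j 0 != 0))) (first : Int)
          = some ((PySem.List.pyRange 0 (first : Int) 1).filter
              (fun j => PySem.List.pyGetD occ j 0 != 0)).length := by
        rw [PySem.List.index?_eq_some_iff]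
        refine ⟨_, _, rfl, rfl, ?_⟩
        intro hmem
        have := PySem.List.mem_pyRange_one.mp (List.mem_of_mem_filter hmem)
        omega
      simp only [hsep, hsplitR, hIdx]
      rw [PySem.List.slice_from_natCast, PySem.List.slice_to_natCast,
          List.drop_left, List.take_left]
      have hsuffF : ((PySem.List.pyRange ((first : Int) + 1) (occ.length : Int) 1).filter
              (fun j => PySem.List.pyGetD occ j 0 != 0))
            ++ ((PySem.List.pyRange 0 (first : Int) 1).filter
              (fun j => PySem.List.pyGetD occ j 0 != 0))
          = (pvSuff (first : Int) (occ.length : Int) (first : Int)).filter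
              (fun j => PySem.List.pyGetD occ j 0 != 0) := by
        unfold pvSuff
        rw [if_pos le_rfl, List.filter_append]
      rw [List.cons_append, PySem.List.slice_from_one,
          PySem.List.slice_to _ (by omega : (0:Int) ≤ 1)]
      simp only [List.tail_cons, Int.toNat_one, List.take_succ_cons, List.take_zero]
      rw [hsuffF, pv_zipfold (occ.length : Int) (first : Int) _ (first : Int) []]
      rw [List.nil_append]
      have hpred : (fun i => !(PySem.List.pyGetD occ i 0 == 0))
          = (fun j => PySem.List.pyGetD occ j 0 != 0) := rfl
      rw [hpred]
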